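-- pv_equiv track=rewrite | github.com/pypi-data/pypi-mirror-389 | packages/securecode-ai/securecode_ai-1.0.0-py3-none-any.whl/securecli/tools/ruby_analyzer.py | _parse_bundler_audit_text
-- ===== SOURCE A (Python) =====
-- from typing import Dict, List, Any, Optional
--
-- def _parse_bundler_audit_text(output: str) -> List[Dict[str, Any]]:
--     """Parse bundler-audit text output"""
--     vulnerabilities = []
--
--     # Pattern to match vulnerability entries
--     lines = output.split('\n')
--     current_vuln = {}
--
--     for line in lines:
--         line = line.strip()
--         if line.startswith('Name:'):
--             if current_vuln:
--                 vulnerabilities.append(current_vuln)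
--                 current_vuln = {}
--             current_vuln['gem'] = line.replace('Name:', '').strip()
--         elif line.startswith('Version:'):
--             current_vuln['version'] = line.replace('Version:', '').strip()
--         elif line.startswith('Advisory:'):
--             current_vuln['advisory'] = line.replace('Advisory:', '').strip()
--         elif line.startswith('Criticality:'):
--             current_vuln['criticality'] = line.replace('Criticality:', '').strip()
--         elif line.startswith('URL:'):
--             current_vuln['url'] = line.replace('URL:', '').strip()
--         elif line.startswith('Title:'):
--             current_vuln['title'] = line.replace('Title:', '').strip()
--         elif line.startswith('Solution:'):
--             current_vuln['solution'] = line.replace('Solution:', '').strip()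
--
--     if current_vuln:
--         vulnerabilities.append(current_vuln)
--
--     return vulnerabilities
-- ===== SOURCE B (Python) =====
-- def _parse_bundler_audit_text(output):
--     """Group stripped lines into segments starting at 'Name:' lines, then parse each segment via a prefix->key table."""
--     lines = [l.strip() for l in output.split('\n')]
--     segs = [[]]
--     for l in lines:
--         if l.startswith('Name:'):
--             segs.append([l])
--         else:
--             segs[-1].append(l)
--     fields = [('Name:', 'gem'), ('Version:', 'version'), ('Advisory:', 'advisory'),
--               ('Criticality:', 'criticality'), ('URL:', 'url'), ('Title:', 'title'),
--               ('Solution:', 'solution')]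
--     result = []
--     for seg in segs:
--         d = {}
--         for l in seg:
--             for p, k in fields:
--                 if l.startswith(p):
--                     d[k] = l.replace(p, '').strip()
--                     break
--         if d:
--             result.append(d)
--     return result
-- ===== Notes on version B (the rewrite author's own statement) =====
-- stated objective: alternative
-- what changed: B replaces A's streaming flush-on-'Name:' loop by a group-then-parse decomposition: it first segments the stripped lines at each 'Name:' line, then builds each record's dict from a prefix-to-key table and keeps the non-empty ones.
import Mathlib
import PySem

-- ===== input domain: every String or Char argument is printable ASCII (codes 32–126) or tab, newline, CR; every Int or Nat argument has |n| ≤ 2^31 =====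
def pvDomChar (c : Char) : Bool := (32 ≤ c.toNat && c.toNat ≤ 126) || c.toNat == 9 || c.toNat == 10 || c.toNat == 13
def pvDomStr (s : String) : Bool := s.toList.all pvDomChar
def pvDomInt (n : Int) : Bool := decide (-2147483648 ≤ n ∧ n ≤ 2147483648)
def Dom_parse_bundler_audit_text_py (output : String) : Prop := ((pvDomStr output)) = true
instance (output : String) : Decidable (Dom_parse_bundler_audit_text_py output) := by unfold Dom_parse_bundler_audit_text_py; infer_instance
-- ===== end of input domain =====

-- B re-implements A's streaming flush-on-'Name:' parser as a group-then-parse decomposition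
-- (segment lines at 'Name:' lines, then parse each segment with a prefix->key table); same cost.

-- ===== PORT A =====
-- one iteration of A's `for line in lines` loop; state = (vulnerabilities, current_vuln)
def pvStepA (st : List (List (String × String)) × PySem.Dict String String) (line0 : String) :
    List (List (String × String)) × PySem.Dict String String :=
  let line := PySem.Str.strip line0
  if PySem.Str.startswith line "Name:" then
    -- `if current_vuln:` flush and reset
    let vulns := if st.2.items ≠ [] then st.1 ++ [st.2.items] else st.1
    let cur := if st.2.items ≠ [] then PySem.Dict.empty else st.2
    (vulns, cur.insert "gem" (PySem.Str.strip (PySem.Str.replace line "Name:" "")))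
  else if PySem.Str.startswith line "Version:" then
    (st.1, st.2.insert "version" (PySem.Str.strip (PySem.Str.replace line "Version:" "")))
  else if PySem.Str.startswith line "Advisory:" then
    (st.1, st.2.insert "advisory" (PySem.Str.strip (PySem.Str.replace line "Advisory:" "")))
  else if PySem.Str.startswith line "Criticality:" then
    (st.1, st.2.insert "criticality" (PySem.Str.strip (PySem.Str.replace line "Criticality:" "")))
  else if PySem.Str.startswith line "URL:" then
    (st.1, st.2.insert "url" (PySem.Str.strip (PySem.Str.replace line "URL:" "")))
  else if PySem.Str.startswith line "Title:" then
    (st.1, st.2.insert "title" (PySem.Str.strip (PySem.Str.replace line "Title:" "")))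
  else if PySem.Str.startswith line "Solution:" then
    (st.1, st.2.insert "solution" (PySem.Str.strip (PySem.Str.replace line "Solution:" "")))
  else st

-- trailing `if current_vuln: vulnerabilities.append(current_vuln)`
def pvFinishA (st : List (List (String × String)) × PySem.Dict String String) :
    List (List (String × String)) :=
  if st.2.items ≠ [] then st.1 ++ [st.2.items] else st.1

def parse_bundler_audit_text_py (output : String) : List (List (String × String)) :=
  pvFinishA (((PySem.Str.split? output "\n").getD []).foldl pvStepA ([], PySem.Dict.empty))

-- ===== PORT B =====
def pvFields : List (String × String) :=
  [("Name:", "gem"), ("Version:", "version"), ("Advisory:", "advisory"),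
   ("Criticality:", "criticality"), ("URL:", "url"), ("Title:", "title"),
   ("Solution:", "solution")]

-- inner `for p, k in fields: if l.startswith(p): d[k] = …; break`
def pvSegIns (d : PySem.Dict String String) (l : String) : PySem.Dict String String :=
  match pvFields.find? (fun pk => PySem.Str.startswith l pk.1) with
  | some (p, k) => d.insert k (PySem.Str.strip (PySem.Str.replace l p ""))
  | none => d

-- `for l in seg: …` building one record's dict
def pvParseSeg (seg : List String) : PySem.Dict String String :=
  seg.foldl pvSegIns PySem.Dict.empty

-- segmentation step: new segment at each 'Name:' line, else append to the last segment
def pvStepB (st : List (List String) × List String) (l : String) : List (List String) × List String :=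
  if PySem.Str.startswith l "Name:" then (st.1 ++ [st.2], [l]) else (st.1, st.2 ++ [l])

-- `if d: result.append(d)` over the segments
def pvEmit (res : List (List (String × String))) (seg : List String) : List (List (String × String)) :=
  let d := pvParseSeg seg
  if d.items ≠ [] then res ++ [d.items] else res

-- close the last segment and emit all non-empty records
def pvSegsOut (st : List (List String) × List String) : List (List (String × String)) :=
  (st.1 ++ [st.2]).foldl pvEmit []

def parse_bundler_audit_text_py_alt (output : String) : List (List (String × String)) :=
  pvSegsOut ((((PySem.Str.split? output "\n").getD []).map PySem.Str.strip).foldl pvStepB ([], []))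

-- ===== PRECONDITION & SPEC =====
def Spec_parse_bundler_audit_text_py (output : String) (out : List (List (String × String))) : Prop := out = parse_bundler_audit_text_py_alt output
instance (output : String) (out : List (List (String × String))) : Decidable (Spec_parse_bundler_audit_text_py output out) := by unfold Spec_parse_bundler_audit_text_py; infer_instance

-- ===== CLAIM (what is proved, stated in full; the proofs are below) =====
def Claim_equal_parse_bundler_audit_text_py : Prop := ∀ (output : String), Dom_parse_bundler_audit_text_py output → Spec_parse_bundler_audit_text_py output (parse_bundler_audit_text_py output)

-- ===== LEMMAS AND PROOFS =====

-- a dict whose items list is empty is the empty dict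
lemma pvDict_empty_of_items_nil (d : PySem.Dict String String) (h : d.items = []) :
    d = PySem.Dict.empty := by
  apply PySem.Dict.ext; simpa using h

-- one A step corresponds to one B segmentation step (on the stripped line)
lemma pvStep_corr (done : List (List String)) (cur : List String) (l : String) :
    pvStepA (done.foldl pvEmit [], pvParseSeg cur) l
      = ((pvStepB (done, cur) (PySem.Str.strip l)).1.foldl pvEmit [],
         pvParseSeg (pvStepB (done, cur) (PySem.Str.strip l)).2) := by
  unfold pvStepA pvStepB
  cases h : PySem.Str.startswith (PySem.Str.strip l) "Name:"
  · -- not a 'Name:' line: the segment grows; compare A's elif chain with the field table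
    simp only [h, Bool.false_eq_true, if_false]
    have hseg : pvParseSeg (cur ++ [PySem.Str.strip l])
        = pvSegIns (pvParseSeg cur) (PySem.Str.strip l) := by
      simp [pvParseSeg, List.foldl_append]
    simp only [hseg, pvSegIns, pvFields, List.find?, h]
    split_ifs <;> simp_all
  · -- a 'Name:' line: flush the current record, start a new segment
    have hflush : (done ++ [cur]).foldl pvEmit []
        = pvEmit (done.foldl pvEmit []) cur := by
      simp [List.foldl_append]
    have h' : PySem.Chars.startswith (PySem.Chars.strip l.toList) ['N','a','m','e',':'] = true := by
      simpa using h
    have hnew : pvParseSeg [PySem.Str.strip l]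
        = PySem.Dict.empty.insert "gem"
            (PySem.Str.strip (PySem.Str.replace (PySem.Str.strip l) "Name:" "")) := by
      simp [pvParseSeg, pvSegIns, pvFields, h']
    simp only [h, if_true, hflush, hnew, pvEmit]
    by_cases h2 : (pvParseSeg cur).items = []
    · have := pvDict_empty_of_items_nil _ h2
      simp [this]
    · simp [h2]

set_option maxHeartbeats 1000000 in
lemma pvMain (ls : List String) : ∀ (done : List (List String)) (cur : List String),
    ls.foldl pvStepA (done.foldl pvEmit [], pvParseSeg cur)
      = ((ls.foldl (fun st l0 => pvStepB st (PySem.Str.strip l0)) (done, cur)).1.foldl pvEmit [],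
         pvParseSeg (ls.foldl (fun st l0 => pvStepB st (PySem.Str.strip l0)) (done, cur)).2) := by
  induction ls with
  | nil => intro done cur; rfl
  | cons l ls ih =>
      intro done cur
      have h := pvStep_corr done cur l
      simp only [List.foldl_cons, h]
      exact ih (pvStepB (done, cur) (PySem.Str.strip l)).1 (pvStepB (done, cur) (PySem.Str.strip l)).2

-- ===== VERDICT (by name: the statement is the Claim_ definition above) =====
theorem parse_bundler_audit_text_py_spec : Claim_equal_parse_bundler_audit_text_py := by
  intro output _
  unfold Spec_parse_bundler_audit_text_py parse_bundler_audit_text_py parse_bundler_audit_text_py_alt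
  rw [List.foldl_map]
  have hmain : ((PySem.Str.split? output "\n").getD []).foldl pvStepA ([], PySem.Dict.empty)
      = ((((PySem.Str.split? output "\n").getD []).foldl
            (fun st l0 => pvStepB st (PySem.Str.strip l0)) ([], [])).1.foldl pvEmit [],
         pvParseSeg (((PySem.Str.split? output "\n").getD []).foldl
            (fun st l0 => pvStepB st (PySem.Str.strip l0)) ([], [])).2) :=
    pvMain ((PySem.Str.split? output "\n").getD []) [] []
  rw [hmain]
  unfold pvSegsOut pvFinishA
  rw [List.foldl_append]
  rfl
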